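-- pv_equiv track=rewrite | github.com/amir9ume/leetcode_practice | 811_subdomain_visit_count.py | getAllDomains
-- ===== SOURCE A (Python) =====
-- def getAllDomains(st):
--     ar=[]
--     subs= st.split('.')
--     base=subs[-1]
--     ar.append(base)
--     size= len(subs)
--     for i in range(size-2,-1,-1):
--         base= subs[i]+'.'+base
--         ar.append(base)
--     return ar
-- ===== SOURCE B (Python) =====
-- def getAllDomains(st):
--     ar = []
--     cur = ''
--     for ch in reversed(st):
--         if ch == '.':
--             ar.append(cur)
--         cur = ch + cur
--     ar.append(cur)
--     return ar
-- ===== Notes on version B (the rewrite author's own statement) =====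
-- stated objective: alternative
-- what changed: Replaces the split-into-components pass plus progressive string reconstruction over component indices with a single right-to-left character scan that emits the running suffix at each dot separator; no component list and no index loop.
import Mathlib
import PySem

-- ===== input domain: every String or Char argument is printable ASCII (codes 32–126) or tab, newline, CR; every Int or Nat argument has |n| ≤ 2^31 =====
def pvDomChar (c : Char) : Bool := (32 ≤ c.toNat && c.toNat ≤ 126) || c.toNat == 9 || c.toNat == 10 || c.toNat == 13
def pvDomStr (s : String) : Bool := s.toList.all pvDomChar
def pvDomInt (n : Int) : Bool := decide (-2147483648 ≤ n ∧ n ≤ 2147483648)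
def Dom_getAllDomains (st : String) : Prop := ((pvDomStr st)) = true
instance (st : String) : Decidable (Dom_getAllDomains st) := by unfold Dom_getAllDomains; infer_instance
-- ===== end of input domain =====

-- B replaces split('.') + progressive reconstruction over component indices with one
-- right-to-left character scan that emits the running suffix at each dot (objective: alternative).

-- ===== PORT A =====
-- A ported over code-point lists (Chars.split?; '+' on str is list append — exact).
def getAllDomains (st : String) : List String :=
  -- ar = []; subs = st.split('.')
  let subs : List (List Char) := (PySem.Chars.split? st.toList ['.']).getD []
  -- base = subs[-1]; ar.append(base)   (subs is never empty, so the index never raises)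
  let base : List Char := (PySem.List.pyGet? subs (-1)).getD []
  let ar : List (List Char) := [base]
  -- size = len(subs); for i in range(size-2, -1, -1): base = subs[i]+'.'+base; ar.append(base)
  let size : Int := subs.length
  let p := (PySem.List.pyRange (size - 2) (-1) (-1)).foldl
    (fun acc i =>
      let b := ((PySem.List.pyGet? subs i).getD []) ++ '.' :: acc.1
      (b, acc.2 ++ [b])) (base, ar)
  p.2.map String.ofList

-- ===== PORT B =====
-- B: ar = []; cur = ''; for ch in reversed(st): if ch == '.': ar.append(cur); cur = ch + cur
--    ar.append(cur); return ar     (ported over code-point lists)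
def getAllDomains_alt (st : String) : List String :=
  let p := st.toList.reverse.foldl
    (fun (acc : List (List Char) × List Char) ch =>
      ((if ch = '.' then acc.1 ++ [acc.2] else acc.1), ch :: acc.2)) ([], [])
  (p.1 ++ [p.2]).map String.ofList

-- ===== PRECONDITION & SPEC =====
def Spec_getAllDomains (st : String) (out : List String) : Prop := out = getAllDomains_alt st
instance (st : String) (out : List String) : Decidable (Spec_getAllDomains st out) := by unfold Spec_getAllDomains; infer_instance

-- ===== CLAIM (what is proved, stated in full; the proofs are below) =====
def Claim_equal_getAllDomains : Prop := ∀ (st : String), Dom_getAllDomains st → Spec_getAllDomains st (getAllDomains st)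

-- ===== LEMMAS AND PROOFS =====

-- A functional view of Python's split('.') on a char list, with the pending chunk `cur` reversed.
def mySplit : List Char → List Char → List (List Char)
  | [], cur => [cur.reverse]
  | c :: rest, cur =>
      if c = '.' then cur.reverse :: mySplit rest [] else mySplit rest (c :: cur)

-- '.'.join
def joinDots : List (List Char) → List Char
  | [] => []
  | [p] => p
  | p :: q :: t => p ++ '.' :: joinDots (q :: t)

-- A's result as a function of the split components.
def aSpec : List (List Char) → List (List Char)
  | [] => []
  | [p] => [p]
  | p :: q :: t => aSpec (q :: t) ++ [p ++ '.' :: joinDots (q :: t)]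

-- B's accumulated list: the suffix after each dot, innermost (rightmost) dot first.
def bAr : List Char → List (List Char)
  | [] => []
  | c :: rest => if c = '.' then bAr rest ++ [rest] else bAr rest

theorem splitOn_go_spec (fuel : Nat) :
    ∀ (l cur : List Char) (acc : List (List Char)), l.length < fuel →
      PySem.Chars.splitOn.go ['.'] fuel l cur acc = acc.reverse ++ mySplit l cur := by
  induction fuel with
  | zero => intro l cur acc h; omega
  | succ f ih =>
    intro l cur acc h
    cases l with
    | nil => rw [PySem.Chars.splitOn.go.eq_def]; simp [mySplit]
    | cons c rest =>
      rw [PySem.Chars.splitOn.go.eq_def]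
      by_cases hc : c = '.'
      · subst hc
        have hpre : ((['.'] : List Char).isPrefixOf ('.' :: rest)) = true := by
          simp [List.isPrefixOf]
        simp only [hpre, if_true]
        rw [show List.drop (['.'] : List Char).length ('.' :: rest) = rest by simp]
        rw [ih rest [] (cur.reverse :: acc) (by simp at h; omega)]
        simp [mySplit]
      · have hpre : (['.'].isPrefixOf (c :: rest)) = false := by
          simp [List.isPrefixOf]; exact fun hh => (hc hh.symm).elim
        simp only [hpre, Bool.false_eq_true, if_false]
        rw [ih rest (c :: cur) acc (by simpa using Nat.lt_of_succ_lt_succ h)]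
        simp [mySplit, hc]

theorem splitOn_dot (cs : List Char) :
    PySem.Chars.splitOn cs ['.'] = mySplit cs [] := by
  unfold PySem.Chars.splitOn
  rw [splitOn_go_spec (cs.length + 1) cs [] [] (by omega)]
  simp

theorem mySplit_ne_nil : ∀ (l cur : List Char), mySplit l cur ≠ [] := by
  intro l
  induction l with
  | nil => intro cur; simp [mySplit]
  | cons c rest ih =>
    intro cur
    by_cases hc : c = '.' <;> simp [mySplit, hc, ih]

theorem joinDots_cons (a : List Char) (h : List Char) (t : List (List Char)) :
    joinDots (a :: h :: t) = a ++ '.' :: joinDots (h :: t) := rfl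

theorem joinDots_mySplit : ∀ (l cur : List Char),
    joinDots (mySplit l cur) = cur.reverse ++ l := by
  intro l
  induction l with
  | nil => intro cur; simp [mySplit, joinDots]
  | cons c rest ih =>
    intro cur
    by_cases hc : c = '.'
    · subst hc
      obtain ⟨h, t, hht⟩ : ∃ h t, mySplit rest [] = h :: t := by
        cases hmt : mySplit rest [] with
        | nil => exact absurd hmt (mySplit_ne_nil rest [])
        | cons h t => exact ⟨h, t, rfl⟩
      have hj : joinDots (h :: t) = rest := by
        have := ih []; rw [hht] at this; simpa using this
      rw [show mySplit ('.' :: rest) cur = cur.reverse :: mySplit rest [] from by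
        simp [mySplit]]
      rw [hht, joinDots_cons, hj]
    · simp only [mySplit, hc, if_false]
      rw [ih (c :: cur)]
      simp

theorem mySplit_cur : ∀ (l cur : List Char),
    mySplit l cur = (cur.reverse ++ (mySplit l []).headI) :: (mySplit l []).tail := by
  intro l
  induction l with
  | nil => intro cur; simp [mySplit]
  | cons c rest ih =>
    intro cur
    by_cases hc : c = '.'
    · subst hc; simp [mySplit]
    · simp only [mySplit, hc, if_false]
      rw [ih (c :: cur), ih [c]]
      simp

theorem aSpec_mySplit : ∀ (cs : List Char),
    aSpec (mySplit cs []) = bAr cs ++ [cs] := by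
  intro cs
  induction cs with
  | nil => simp [mySplit, aSpec, bAr]
  | cons c rest ih =>
    by_cases hc : c = '.'
    · subst hc
      obtain ⟨h, t, hht⟩ : ∃ h t, mySplit rest [] = h :: t := by
        cases hmt : mySplit rest [] with
        | nil => exact absurd hmt (mySplit_ne_nil rest [])
        | cons h t => exact ⟨h, t, rfl⟩
      have hj : joinDots (h :: t) = rest := by
        have := joinDots_mySplit rest []; rw [hht] at this; simpa using this
      rw [hht] at ih
      rw [show mySplit ('.' :: rest) [] = [] :: mySplit rest [] from by simp [mySplit], hht]
      rw [show bAr ('.' :: rest) = bAr rest ++ [rest] from by simp [bAr]]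
      rw [show aSpec ([] :: h :: t) = aSpec (h :: t) ++ [[] ++ '.' :: joinDots (h :: t)]
        from rfl]
      rw [ih, hj]
      simp
    · simp only [mySplit, hc, if_false, bAr]
      rw [mySplit_cur rest [c]]
      obtain ⟨h, t, hht⟩ : ∃ h t, mySplit rest [] = h :: t := by
        cases hmt : mySplit rest [] with
        | nil => exact absurd hmt (mySplit_ne_nil rest [])
        | cons h t => exact ⟨h, t, rfl⟩
      rw [hht] at ih ⊢
      simp only [List.headI, List.tail_cons, List.reverse_cons, List.reverse_nil,
        List.nil_append, List.singleton_append]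
      have hjr : joinDots (h :: t) = rest := by
        have := joinDots_mySplit rest []; rw [hht] at this; simpa using this
      cases t with
      | nil =>
        -- mySplit rest [] = [h]: then bAr rest = [] and h = rest
        simp only [aSpec] at ih ⊢
        have h1 : h = rest := by simpa [joinDots] using hjr
        have h2 : bAr rest = [] := by
          cases hb : bAr rest with
          | nil => rfl
          | cons x xs =>
            rw [hb] at ih
            exact absurd (congrArg List.length ih) (by simp)
        simp [h1, h2]
      | cons q t' =>
        simp only [aSpec] at ih ⊢
        -- ih : aSpec (q::t') ++ [h ++ '.' :: joinDots (q::t')] = bAr rest ++ [rest]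
        have hcancel : aSpec (q :: t') = bAr rest ∧
            (h ++ '.' :: joinDots (q :: t')) = rest := by
          have := ih
          rw [← List.concat_eq_append, ← List.concat_eq_append] at this
          exact List.concat_inj.mp this
        rw [hcancel.1, ← hcancel.2]
        simp


theorem bAr_foldr : ∀ (cs : List Char),
    List.foldr (fun ch (acc : List (List Char) × List Char) =>
        ((if ch = '.' then acc.1 ++ [acc.2] else acc.1), ch :: acc.2)) ([], []) cs
      = (bAr cs, cs) := by
  intro cs
  induction cs with
  | nil => simp [bAr]
  | cons c rest ih =>
    by_cases hc : c = '.' <;> simp [List.foldr_cons, ih, bAr, hc]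

theorem alt_eq (st : String) :
    getAllDomains_alt st = (bAr st.toList ++ [st.toList]).map String.ofList := by
  simp only [getAllDomains_alt, List.foldl_reverse, bAr_foldr]

theorem aSpec_foldr (l : List (List Char)) (hl : l ≠ []) :
    List.foldr (fun (x : List Char) (acc : List Char × List (List Char)) =>
        (x ++ '.' :: acc.1, acc.2 ++ [x ++ '.' :: acc.1]))
      (l.getLast hl, [l.getLast hl]) l.dropLast = (joinDots l, aSpec l) := by
  induction l with
  | nil => exact absurd rfl hl
  | cons p ps ih =>
    cases ps with
    | nil => simp [joinDots, aSpec]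
    | cons q t =>
      have hne : q :: t ≠ [] := by simp
      have hlast : (p :: q :: t).getLast hl = (q :: t).getLast hne := by
        simp [List.getLast_cons]
      rw [show (p :: q :: t).dropLast = p :: (q :: t).dropLast by simp]
      rw [List.foldr_cons, hlast, ih hne]
      simp [joinDots_cons, aSpec]

theorem pyGet?_neg_one {α : Type} (l : List α) : PySem.List.pyGet? l (-1) = l.getLast? := by
  cases l with
  | nil => simp [PySem.List.pyGet?, PySem.List.pyIdx?]
  | cons x xs =>
    simp only [PySem.List.pyGet?, PySem.List.pyIdx?]
    rw [if_neg (by omega), if_pos (by simp)]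
    rw [List.getLast?_eq_getElem?]
    simp

theorem a_eq (st : String) :
    getAllDomains st = (aSpec (mySplit st.toList [])).map String.ofList := by
  unfold getAllDomains
  simp only [PySem.Chars.split?, List.isEmpty_cons, Bool.false_eq_true, if_false,
    Option.getD_some, splitOn_dot]
  set l : List (List Char) := mySplit st.toList []
  have hne : l ≠ [] := mySplit_ne_nil _ _
  have hlpos : 1 ≤ l.length := List.length_pos_iff.mpr hne
  have hbase : (PySem.List.pyGet? l (-1)).getD [] = l.getLast hne := by
    rw [pyGet?_neg_one, List.getLast?_eq_some_getLast hne]; simp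
  rw [hbase]
  rw [PySem.List.pyRange_neg_one_eq_reverse]
  rw [show ((-1 : Int) + 1) = 0 by norm_num]
  rw [show ((l.length : Int) - 2 + 1) = (l.dropLast.length : Int) by
    simp only [List.length_dropLast]; omega]
  rw [List.foldl_reverse]
  have hmap : (PySem.List.pyRange 0 (l.dropLast.length : Int)).map
      (fun i => (PySem.List.pyGet? l i).getD []) = l.dropLast := by
    have hcong : ∀ i ∈ PySem.List.pyRange 0 (l.dropLast.length : Int),
        (fun i => (PySem.List.pyGet? l i).getD []) i
          = (fun i => PySem.List.pyGetD l.dropLast i []) i := by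
      intro i hi
      rw [PySem.List.mem_pyRange_one] at hi
      have hidl : i < (l.dropLast.length : Int) := hi.2
      have hil : i < (l.length : Int) := by
        simp only [List.length_dropLast] at hidl; omega
      show (PySem.List.pyGet? l i).getD [] = PySem.List.pyGetD l.dropLast i []
      rw [show (PySem.List.pyGet? l i).getD [] = PySem.List.pyGetD l i [] from rfl]
      rw [PySem.List.pyGetD_eq_getElem l [] hi.1 hil,
          PySem.List.pyGetD_eq_getElem l.dropLast [] hi.1 hidl]
      exact (List.getElem_dropLast _).symm
    rw [List.map_congr_left hcong]
    have := PySem.List.map_pyGetD_pyRange_zero l.dropLast ([] : List Char)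
    simpa [PySem.List.len_eq] using this
  have h1 : List.foldr (fun (x : List Char) (acc : List Char × List (List Char)) =>
        (x ++ '.' :: acc.1, acc.2 ++ [x ++ '.' :: acc.1]))
      (l.getLast hne, [l.getLast hne])
      ((PySem.List.pyRange 0 (l.dropLast.length : Int)).map
        (fun i => (PySem.List.pyGet? l i).getD [])) = (joinDots l, aSpec l) := by
    rw [hmap]; exact aSpec_foldr l hne
  have h2 := List.foldr_map
    (f := fun i : Int => (PySem.List.pyGet? l i).getD ([] : List Char))
    (g := fun (x : List Char) (acc : List Char × List (List Char)) =>
      (x ++ '.' :: acc.1, acc.2 ++ [x ++ '.' :: acc.1]))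
    (l := PySem.List.pyRange 0 (l.dropLast.length : Int))
    (init := (l.getLast hne, [l.getLast hne]))
  have hfold := h2.symm.trans h1
  rw [hfold]

-- ===== VERDICT (by name: the statement is the Claim_ definition above) =====
theorem getAllDomains_spec : Claim_equal_getAllDomains := by
  intro st _
  unfold Spec_getAllDomains
  rw [a_eq, alt_eq, aSpec_mySplit]
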